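-- pv_equiv track=rewrite | github.com/nd5a/Leetcode-problems | Day193.py | maximumValueSum
-- ===== SOURCE A (Python) =====
-- def maximumValueSum(nums, k, edges):
--     N = len(nums)
--
--     delta = []
--     for x in nums:
--         delta.append((x ^ k) - x)
--     delta.sort(reverse = True)
--
--     total=  sum(nums)
--     for i in range(0, N, 2):
--         if i + 1>= N:
--             continue
--         a, b = delta[i], delta[i + 1]
--         if a + b > 0:
--             total += (a + b)
--     return total
-- ===== SOURCE B (Python) =====
-- def maximumValueSum(nums, k, edges):
--     # One pass: sum positive XOR-deltas; if their count is odd, fix parity by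
--     # dropping the smallest positive delta or adding the largest non-positive one.
--     s = 0
--     odd = False
--     min_pos = None
--     max_np = None
--     for x in nums:
--         d = (x ^ k) - x
--         if d > 0:
--             s += d
--             odd = not odd
--             if min_pos is None or d < min_pos:
--                 min_pos = d
--         else:
--             if max_np is None or d > max_np:
--                 max_np = d
--     gain = s
--     if odd:
--         gain = s - min_pos
--         if max_np is not None and s + max_np > gain:
--             gain = s + max_np
--     return sum(nums) + gain
-- ===== Notes on version B (the rewrite author's own statement) =====
-- stated objective: faster
-- what changed: A builds the delta list, sorts it descending and adds each adjacent pair with positive sum; B makes a single unsorted pass summing the positive deltas and, when their count is odd, fixes parity by dropping the smallest positive delta or adding the largest non-positive one, whichever is larger.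
import Mathlib
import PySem

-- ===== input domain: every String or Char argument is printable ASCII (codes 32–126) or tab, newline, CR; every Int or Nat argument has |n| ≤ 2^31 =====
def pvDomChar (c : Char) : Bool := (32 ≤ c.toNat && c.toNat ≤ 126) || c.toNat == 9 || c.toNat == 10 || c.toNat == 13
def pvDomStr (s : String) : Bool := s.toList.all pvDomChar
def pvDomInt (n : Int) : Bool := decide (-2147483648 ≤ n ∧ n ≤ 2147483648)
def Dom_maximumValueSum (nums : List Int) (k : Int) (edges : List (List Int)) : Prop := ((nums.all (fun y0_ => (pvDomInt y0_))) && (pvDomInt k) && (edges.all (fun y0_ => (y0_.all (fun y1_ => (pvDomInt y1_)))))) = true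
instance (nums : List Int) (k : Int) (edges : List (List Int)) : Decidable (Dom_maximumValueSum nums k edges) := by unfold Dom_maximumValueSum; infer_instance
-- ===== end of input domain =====

-- B replaces A's sort-then-pair-scan with a single O(n) pass: sum the positive XOR-deltas and,
-- when their count is odd, fix parity via the smallest positive / largest non-positive delta.

-- ===== PORT A =====
-- delta = []; for x in nums: delta.append((x ^ k) - x); delta.sort(reverse=True);
-- total = sum(nums); for i in range(0, N, 2): skip if i+1 >= N else add delta[i]+delta[i+1] when positive.
-- (delta[i] is always in range under the i+1 < N guard, so pyGetD with default 0 is exact.)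
def maximumValueSum (nums : List Int) (k : Int) (edges : List (List Int)) : Int :=
  let N : Int := PySem.List.len nums
  let delta : List Int := nums.foldl (fun acc x => acc ++ [PySem.Int.bxor x k - x]) []
  let delta := PySem.List.sorted delta (fun d => d) true
  let total := nums.sum
  (PySem.List.pyRange 0 N 2).foldl (fun total i =>
    if i + 1 ≥ N then total
    else
      let a := PySem.List.pyGetD delta i 0
      let b := PySem.List.pyGetD delta (i + 1) 0
      if a + b > 0 then total + (a + b) else total) total

-- ===== PORT B =====
-- one fold carrying (s, odd, min_pos, max_np); when odd, min_pos is some _, so getD 0 never defaults.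
def maximumValueSum_alt (nums : List Int) (k : Int) (edges : List (List Int)) : Int :=
  let st : Int × Bool × Option Int × Option Int :=
    nums.foldl (fun st x =>
      let d := PySem.Int.bxor x k - x
      if d > 0 then
        (st.1 + d, !st.2.1,
         (match st.2.2.1 with | none => some d | some m => if d < m then some d else some m),
         st.2.2.2)
      else
        (st.1, st.2.1, st.2.2.1,
         (match st.2.2.2 with | none => some d | some m => if d > m then some d else some m)))
      (0, false, none, none)
  let gain :=
    if st.2.1 then
      let g := st.1 - st.2.2.1.getD 0
      match st.2.2.2 with
      | some v => if st.1 + v > g then st.1 + v else g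
      | none => g
    else st.1
  nums.sum + gain

-- ===== PRECONDITION & SPEC =====
def Spec_maximumValueSum (nums : List Int) (k : Int) (edges : List (List Int)) (out : Int) : Prop := out = maximumValueSum_alt nums k edges
instance (nums : List Int) (k : Int) (edges : List (List Int)) (out : Int) : Decidable (Spec_maximumValueSum nums k edges out) := by unfold Spec_maximumValueSum; infer_instance

-- ===== CLAIM (what is proved, stated in full; the proofs are below) =====
def Claim_equal_maximumValueSum : Prop := ∀ (nums : List Int) (k : Int) (edges : List (List Int)), Dom_maximumValueSum nums k edges → Spec_maximumValueSum nums k edges (maximumValueSum nums k edges)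

-- ===== LEMMAS AND PROOFS =====

def pairA : List Int → Int
  | a :: b :: rest => (if a + b > 0 then a + b else 0) + pairA rest
  | _ => 0

def gainC (P Q : List Int) : Int :=
  if P.length % 2 = 1 then
    Q.max?.elim (P.sum - P.min?.getD 0)
      (fun v => if P.sum + v > P.sum - P.min?.getD 0 then P.sum + v else P.sum - P.min?.getD 0)
  else P.sum

def gainF (L : List Int) : Int := gainC (L.filter (fun d => 0 < d)) (L.filter (fun d => d ≤ 0))

def updMin (o : Option Int) (d : Int) : Option Int :=
  match o with | none => some d | some m => if d < m then some d else some m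
def updMax (o : Option Int) (d : Int) : Option Int :=
  match o with | none => some d | some m => if d > m then some d else some m

lemma pyRange_two_nil (a b : Int) (h : b ≤ a) : PySem.List.pyRange a b 2 = [] := by
  rw [PySem.List.pyRange_of_pos a b (by norm_num)]
  simp [if_neg (not_lt.mpr h)]

lemma pyRange_two_cons (a b : Int) (h : a < b) :
    PySem.List.pyRange a b 2 = a :: PySem.List.pyRange (a + 2) b 2 := by
  rw [PySem.List.pyRange_of_pos a b (by norm_num), PySem.List.pyRange_of_pos (a+2) b (by norm_num)]
  by_cases h2 : a + 2 < b
  · rw [if_pos h, if_pos h2]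
    have hn : ((b - a + 2 - 1) / 2).toNat = ((b - (a+2) + 2 - 1) / 2).toNat + 1 := by omega
    rw [hn, List.range_succ_eq_map]
    simp only [List.map_cons, List.map_map]
    refine congrArg₂ _ (by simp) (List.map_congr_left ?_)
    intro k _; simp [Function.comp]; ring
  · rw [if_pos h, if_neg h2]
    have hn : ((b - a + 2 - 1) / 2).toNat = 1 := by omega
    rw [hn]; simp

lemma foldA_eq_pairA (M : List Int) : ∀ (pre : List Int) (t : Int), ∀ (L : List Int), L = pre ++ M →
    (PySem.List.pyRange (pre.length : Int) (L.length : Int) 2).foldl (fun total i =>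
      if i + 1 ≥ (L.length : Int) then total
      else
        let a := PySem.List.pyGetD L i 0
        let b := PySem.List.pyGetD L (i + 1) 0
        if a + b > 0 then total + (a + b) else total) t = t + pairA M := by
  induction M using pairA.induct with
  | case2 M h1 =>
    intro pre t L hL
    rcases M with _ | ⟨a, _ | ⟨b, rest⟩⟩
    · rw [pyRange_two_nil _ _ (by simp [hL])]
      simp [pairA]
    · have hlen : L.length = pre.length + 1 := by simp [hL]
      rw [pyRange_two_cons _ _ (by exact_mod_cast by omega), pyRange_two_nil _ _ (by exact_mod_cast by omega)]
      simp only [List.foldl_cons, List.foldl_nil]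
      rw [if_pos (by exact_mod_cast by omega)]
      simp [pairA]
    · exact absurd rfl (fun h => h1 a b rest h)
  | case1 a b rest ih =>
    intro pre t L hL
    have hlen : L.length = pre.length + 2 + rest.length := by simp [hL]; omega
    rw [pyRange_two_cons _ _ (by exact_mod_cast by omega)]
    simp only [List.foldl_cons]
    rw [if_neg (by push_cast; omega)]
    have hga : PySem.List.pyGetD L ((pre.length : Int)) 0 = a := by
      rw [PySem.List.pyGetD_natCast, hL, List.getD_append_right _ _ _ _ (le_refl _)]
      simp
    have hgb : PySem.List.pyGetD L ((pre.length : Int) + 1) 0 = b := by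
      have : ((pre.length : Int) + 1) = ((pre.length + 1 : Nat) : Int) := by push_cast; ring
      rw [this, PySem.List.pyGetD_natCast, hL, List.getD_append_right _ _ _ _ (by omega)]
      simp
    simp only [hga, hgb]
    have hpre2 : ((pre.length : Int) + 2) = (((pre ++ [a, b]).length : Nat) : Int) := by push_cast [List.length_append, List.length_cons]; simp
    rw [hpre2, ih (pre ++ [a, b]) _ L (by simp [hL])]
    by_cases hab : a + b > 0 <;> simp [pairA, hab] <;> ring

lemma pairA_of_nonpos (L : List Int) (h : ∀ x ∈ L, x ≤ 0) : pairA L = 0 := by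
  induction L using pairA.induct with
  | case1 a b rest ih =>
    have ha := h a (by simp); have hb := h b (by simp)
    rw [pairA, if_neg (by omega), ih (fun x hx => h x (by simp [hx]))]
    ring
  | case2 t h1 =>
    rcases t with _ | ⟨a, _ | ⟨b, rest⟩⟩
    · rfl
    · rfl
    · exact absurd rfl (fun hc => h1 a b rest hc)

lemma min?_perm {l1 l2 : List Int} (h : l1.Perm l2) : l1.min? = l2.min? := by
  cases e : l1.min? with
  | none =>
    rw [List.min?_eq_none_iff] at e
    simp [e, (show l2 = [] from ((e ▸ h).symm).eq_nil)]
  | some a =>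
    rw [List.min?_eq_some_iff] at e
    rw [eq_comm, List.min?_eq_some_iff]
    exact ⟨h.mem_iff.mp e.1, fun b hb => e.2 b (h.mem_iff.mpr hb)⟩

lemma max?_perm {l1 l2 : List Int} (h : l1.Perm l2) : l1.max? = l2.max? := by
  cases e : l1.max? with
  | none =>
    rw [List.max?_eq_none_iff] at e
    simp [e, (show l2 = [] from ((e ▸ h).symm).eq_nil)]
  | some a =>
    rw [List.max?_eq_some_iff] at e
    rw [eq_comm, List.max?_eq_some_iff]
    exact ⟨h.mem_iff.mp e.1, fun b hb => e.2 b (h.mem_iff.mpr hb)⟩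

lemma gainF_perm {l1 l2 : List Int} (h : l1.Perm l2) : gainF l1 = gainF l2 := by
  have hP := h.filter (fun d => decide (0 < d))
  have hQ := h.filter (fun d => decide (d ≤ 0))
  unfold gainF gainC
  rw [hP.sum_eq, hP.length_eq, min?_perm hP, max?_perm hQ]

lemma pairA_eq_gainF (L : List Int) (hs : L.Pairwise (fun a b => b ≤ a)) : pairA L = gainF L := by
  induction L using pairA.induct with
  | case2 t h1 =>
    rcases t with _ | ⟨a, _ | ⟨b, rest⟩⟩
    · rfl
    · by_cases ha : 0 < a
      · simp [pairA, gainF, gainC, List.filter_cons, ha, show ¬ a ≤ 0 by omega]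
      · simp [pairA, gainF, gainC, List.filter_cons, ha, show a ≤ 0 by omega]
    · exact absurd rfl (fun hc => h1 a b rest hc)
  | case1 a b rest ih =>
    obtain ⟨hhd, hs2⟩ := List.pairwise_cons.mp hs
    obtain ⟨hb_rest, hrest⟩ := List.pairwise_cons.mp hs2
    have hab : b ≤ a := hhd b (by simp)
    have ha_rest : ∀ x ∈ rest, x ≤ a := fun x hx => hhd x (by simp [hx])
    by_cases hb : 0 < b
    · have ha : 0 < a := by omega
      have hPw : (a :: b :: rest).filter (fun d => 0 < d) = a :: b :: rest.filter (fun d => 0 < d) := by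
        simp [List.filter_cons, ha, hb]
      have hQw : (a :: b :: rest).filter (fun d => d ≤ 0) = rest.filter (fun d => d ≤ 0) := by
        simp [List.filter_cons, show ¬ a ≤ 0 by omega, show ¬ b ≤ 0 by omega]
      rw [pairA, if_pos (by omega), ih hrest]
      unfold gainF gainC
      rw [hPw, hQw]
      set P := rest.filter (fun d => 0 < d) with hP
      set Q := rest.filter (fun d => d ≤ 0) with hQ
      have hlen : (a :: b :: P).length % 2 = P.length % 2 := by
        simp only [List.length_cons]; omega
      rw [hlen]
      by_cases hodd : P.length % 2 = 1
      · rw [if_pos hodd, if_pos hodd]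
        have hPne : P ≠ [] := by intro hnil; rw [hnil] at hodd; simp at hodd
        obtain ⟨m, hm⟩ := Option.ne_none_iff_exists'.mp (fun hn => hPne (List.min?_eq_none_iff.mp hn))
        have hmP : m ∈ P := List.min?_mem hm
        have hmb : m ≤ b := hb_rest m (List.mem_of_mem_filter hmP)
        have hminw : (a :: b :: P).min? = some m := by
          rw [List.min?_cons, List.min?_cons, hm]
          simp [Option.elim]
          omega
        rw [hminw, hm]
        simp only [List.sum_cons, Option.getD_some]
        cases hQm : Q.max? with
        | none => simp only [Option.elim_none]; ring
        | some v => simp only [Option.elim_some]; split_ifs <;> omega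
      · rw [if_neg hodd, if_neg hodd]
        simp only [List.sum_cons]; ring
    · by_cases ha : 0 < a
      · -- a positive, b and all of rest non-positive
        have hble : b ≤ 0 := by omega
        have hrnp : ∀ x ∈ rest, x ≤ 0 := fun x hx => le_trans (hb_rest x hx) hble
        have hPw : (a :: b :: rest).filter (fun d => 0 < d) = [a] := by
          simp [List.filter_cons, ha, show ¬ (0:Int) < b by omega, List.filter_eq_nil_iff]
          intro x hx; have := hrnp x hx; omega
        have hQw : (a :: b :: rest).filter (fun d => d ≤ 0) = b :: rest := by
          simp [List.filter_cons, show ¬ a ≤ 0 by omega, hble, List.filter_eq_self]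
          intro x hx; simpa using hrnp x hx
        rw [pairA, pairA_of_nonpos rest hrnp]
        unfold gainF gainC
        rw [hPw, hQw]
        have hmaxw : (b :: rest).max? = some b := by
          rw [List.max?_cons]
          cases hm : rest.max? with
          | none => simp
          | some y =>
            have hy : y ≤ b := hb_rest y (List.max?_mem hm)
            simp [Option.elim]
            omega
        rw [hmaxw]
        simp only [List.length_singleton, List.sum_cons, List.sum_nil, List.min?_cons,
          List.min?_nil, Option.elim_none, Option.elim_some, Option.getD_some]
        norm_num
      · have hanp : a ≤ 0 := by omega
        have hrnp : ∀ x ∈ rest, x ≤ 0 := fun x hx => le_trans (ha_rest x hx) hanp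
        have hall : ∀ x ∈ a :: b :: rest, x ≤ 0 := by
          intro x hx
          rcases List.mem_cons.mp hx with rfl | hx
          · omega
          rcases List.mem_cons.mp hx with rfl | hx
          · omega
          · exact hrnp x hx
        rw [pairA_of_nonpos _ hall]
        have hPw : (a :: b :: rest).filter (fun d => 0 < d) = [] := by
          rw [List.filter_eq_nil_iff]; intro x hx; have := hall x hx; simp; omega
        unfold gainF gainC
        rw [hPw]
        simp

lemma foldl_updMin_some (P : List Int) : ∀ m, P.foldl updMin (some m) = some (P.foldl min m) := by
  induction P with
  | nil => intro m; rfl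
  | cons d P ih =>
    intro m
    have : updMin (some m) d = some (min m d) := by
      simp only [updMin]; split_ifs <;> simp [min_def] <;> omega
    simp only [List.foldl_cons, this, ih]
lemma foldl_updMin_none (P : List Int) : P.foldl updMin none = P.min? := by
  cases P with
  | nil => rfl
  | cons d P => simp only [List.foldl_cons, updMin, foldl_updMin_some, List.min?_cons']
lemma foldl_updMax_some (P : List Int) : ∀ m, P.foldl updMax (some m) = some (P.foldl max m) := by
  induction P with
  | nil => intro m; rfl
  | cons d P ih =>
    intro m
    have : updMax (some m) d = some (max m d) := by
      simp only [updMax]; split_ifs <;> simp [max_def] <;> omega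
    simp only [List.foldl_cons, this, ih]
lemma foldl_updMax_none (P : List Int) : P.foldl updMax none = P.max? := by
  cases P with
  | nil => rfl
  | cons d P => simp only [List.foldl_cons, updMax, foldl_updMax_some, List.max?_cons']

lemma bstep_inv (l : List Int) : ∀ (s : Int) (odd : Bool) (mp mn : Option Int),
    l.foldl (fun (st : Int × Bool × Option Int × Option Int) d =>
      if d > 0 then
        (st.1 + d, !st.2.1,
         (match st.2.2.1 with | none => some d | some m => if d < m then some d else some m),
         st.2.2.2)
      else
        (st.1, st.2.1, st.2.2.1,
         (match st.2.2.2 with | none => some d | some m => if d > m then some d else some m)))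
      (s, odd, mp, mn)
    = (s + (l.filter (fun d => 0 < d)).sum,
       odd ^^ decide ((l.filter (fun d => 0 < d)).length % 2 = 1),
       (l.filter (fun d => 0 < d)).foldl updMin mp,
       (l.filter (fun d => d ≤ 0)).foldl updMax mn) := by
  induction l with
  | nil => intro s odd mp mn; simp
  | cons d l ih =>
    intro s odd mp mn
    by_cases hd : 0 < d
    · have hP : List.filter (fun x => decide (0 < x)) (d :: l) = d :: List.filter (fun x => decide (0 < x)) l := by
        simp [hd]
      have hQ : List.filter (fun x => decide (x ≤ 0)) (d :: l) = List.filter (fun x => decide (x ≤ 0)) l := by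
        rw [List.filter_cons]; simp [show ¬ d ≤ 0 from by omega]
      simp only [List.foldl_cons, if_pos hd, hP, hQ]
      rw [ih]
      simp only [List.sum_cons, List.length_cons]
      refine congrArg₂ _ (by ring) (congrArg₂ _ ?_ rfl)
      rcases Nat.even_or_odd (l.filter (fun x => 0 < x)).length with he | ho
      · have h1 : (l.filter (fun x => 0 < x)).length % 2 = 0 := Nat.even_iff.mp he
        have h2 : ((l.filter (fun x => 0 < x)).length + 1) % 2 = 1 := by omega
        simp [h1, h2]
      · have h1 : (l.filter (fun x => 0 < x)).length % 2 = 1 := Nat.odd_iff.mp ho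
        have h2 : ((l.filter (fun x => 0 < x)).length + 1) % 2 = 0 := by omega
        simp [h1, h2]
    · have hP : List.filter (fun x => decide (0 < x)) (d :: l) = List.filter (fun x => decide (0 < x)) l := by
        simp [hd]
      have hQ : List.filter (fun x => decide (x ≤ 0)) (d :: l) = d :: List.filter (fun x => decide (x ≤ 0)) l := by
        rw [List.filter_cons]; simp [show d ≤ 0 from by omega]
      simp only [List.foldl_cons, if_neg hd, hP, hQ]
      rw [ih]
      rfl

lemma final_eq (nums : List Int) (k : Int) (edges : List (List Int)) :
    maximumValueSum nums k edges = maximumValueSum_alt nums k edges := by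
  unfold maximumValueSum maximumValueSum_alt
  simp only [PySem.List.foldl_append_singleton_eq_map, List.nil_append, PySem.List.len_eq]
  set f : Int → Int := fun x => PySem.Int.bxor x k - x with hf
  set L : List Int := PySem.List.sorted (nums.map f) (fun d => d) true with hL
  -- A side
  have hlen : (nums.length : Int) = (L.length : Int) := by
    rw [hL, PySem.List.length_sorted, List.length_map]
  rw [hlen]
  have hA := foldA_eq_pairA L [] nums.sum L (by simp)
  simp only [List.length_nil, Nat.cast_zero] at hA
  rw [hA]
  -- B side
  have hmap : (nums.foldl (fun (st : Int × Bool × Option Int × Option Int) x =>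
      let d := f x
      if d > 0 then
        (st.1 + d, !st.2.1,
         (match st.2.2.1 with | none => some d | some m => if d < m then some d else some m),
         st.2.2.2)
      else
        (st.1, st.2.1, st.2.2.1,
         (match st.2.2.2 with | none => some d | some m => if d > m then some d else some m)))
      (0, false, none, none))
      = ((nums.map f).foldl (fun (st : Int × Bool × Option Int × Option Int) d =>
      if d > 0 then
        (st.1 + d, !st.2.1,
         (match st.2.2.1 with | none => some d | some m => if d < m then some d else some m),
         st.2.2.2)
      else
        (st.1, st.2.1, st.2.2.1,
         (match st.2.2.2 with | none => some d | some m => if d > m then some d else some m)))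
      (0, false, none, none)) := by
    rw [List.foldl_map]
  rw [hmap, bstep_inv]
  -- both sides to gainF
  have hpair : pairA L = gainF (nums.map f) := by
    rw [pairA_eq_gainF L ?hs, gainF_perm (PySem.List.sorted_perm (nums.map f) (fun d => d) true)]
    case hs =>
      have := PySem.List.sorted_pairwise_rev (nums.map f) (fun d => d)
      simpa using this
  rw [hpair]
  unfold gainF gainC
  simp only [Bool.false_xor, zero_add, foldl_updMin_none, foldl_updMax_none, decide_eq_true_eq]
  set P := (nums.map f).filter (fun d => 0 < d)
  set Q := (nums.map f).filter (fun d => d ≤ 0)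
  by_cases hodd : P.length % 2 = 1
  · rw [if_pos hodd, if_pos hodd]
    cases hQm : Q.max? with
    | none => simp
    | some v => simp
  · rw [if_neg hodd, if_neg hodd]

-- ===== VERDICT (by name: the statement is the Claim_ definition above) =====
theorem maximumValueSum_spec : Claim_equal_maximumValueSum := by
  intro nums k edges _
  unfold Spec_maximumValueSum
  exact final_eq nums k edges
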